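-- pv_equiv track=rewrite | github.com/daniel-reich/ubiquitous-fiesta | Q7oecYfjkq7tHwPoA_6.py | climb
-- ===== SOURCE A (Python) =====
-- def climb(stamina, obstacles):
--     count = 0
--     for x, y in zip(obstacles, obstacles[1:]):
--         count += 1
--         dist = x - y
--         if dist > 0:
--             f = 1
--         else:
--             f = 2
--         a, b = divmod(abs(dist), 1)
--         if b > 0:
--             a += 1
--         stamina = stamina - (f * a)
--         if stamina < 0:
--             return count - 1
--     return count
-- ===== SOURCE B (Python) =====
-- def climb(stamina, obstacles):
--     costs = [(1 if x > y else 2) * abs(x - y) for x, y in zip(obstacles, obstacles[1:])]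
--     total = 0
--     prefixes = []
--     for c in costs:
--         total += c
--         prefixes.append(total)
--     for i, p in enumerate(prefixes):
--         if p > stamina:
--             return i
--     return len(costs)
-- ===== Notes on version B (the rewrite author's own statement) =====
-- stated objective: alternative
-- what changed: B replaces A's stateful stamina-draining simulation (mutating stamina and count, with the divmod-based ceiling) by a cost list plus running prefix sums, returning the index of the first prefix exceeding stamina.
import Mathlib
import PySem

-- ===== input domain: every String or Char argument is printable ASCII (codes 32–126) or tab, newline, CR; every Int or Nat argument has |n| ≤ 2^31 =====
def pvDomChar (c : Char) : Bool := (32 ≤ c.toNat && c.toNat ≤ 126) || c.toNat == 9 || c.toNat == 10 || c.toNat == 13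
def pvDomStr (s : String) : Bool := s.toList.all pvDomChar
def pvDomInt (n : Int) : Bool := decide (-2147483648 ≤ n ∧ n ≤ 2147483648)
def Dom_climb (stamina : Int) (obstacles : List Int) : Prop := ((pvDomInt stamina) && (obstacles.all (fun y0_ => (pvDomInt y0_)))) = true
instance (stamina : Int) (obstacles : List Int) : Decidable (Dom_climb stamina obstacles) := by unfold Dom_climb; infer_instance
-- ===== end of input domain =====

-- B replaces A's stateful stamina-draining simulation by cost list + prefix sums scanned for the first prefix exceeding stamina (alternative decomposition, same cost).

-- ===== PORT A =====
-- the for-loop of A, with early return; state (stamina, count)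
def climbLoop (stamina : Int) (count : Int) : List (Int × Int) → Int
  | [] => count
  | (x, y) :: rest =>
    let count' := count + 1
    let dist := x - y
    let f : Int := if dist > 0 then 1 else 2
    let a := PySem.Int.floordiv |dist| 1
    let b := PySem.Int.mod |dist| 1
    let a' := if b > 0 then a + 1 else a
    let stamina' := stamina - f * a'
    if stamina' < 0 then count' - 1 else climbLoop stamina' count' rest

def climb (stamina : Int) (obstacles : List Int) : Int :=
  climbLoop stamina 0 (obstacles.zip (PySem.List.slice obstacles (some 1) none))

-- ===== PORT B =====
-- the second for-loop of Source B: first index i with p > stamina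
def altScan (stamina : Int) (i : Int) : List Int → Option Int
  | [] => none
  | p :: rest => if p > stamina then some i else altScan stamina (i + 1) rest

def climb_alt (stamina : Int) (obstacles : List Int) : Int :=
  let costs := (obstacles.zip (PySem.List.slice obstacles (some 1) none)).map
    (fun xy => (if xy.1 > xy.2 then (1 : Int) else 2) * |xy.1 - xy.2|)
  let prefixes := (costs.foldl (fun (acc : Int × List Int) c => (acc.1 + c, acc.2 ++ [acc.1 + c])) (0, [])).2
  match altScan stamina 0 prefixes with
  | some i => i
  | none => (costs.length : Int)

-- ===== PRECONDITION & SPEC =====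
def Spec_climb (stamina : Int) (obstacles : List Int) (out : Int) : Prop := out = climb_alt stamina obstacles
instance (stamina : Int) (obstacles : List Int) (out : Int) : Decidable (Spec_climb stamina obstacles out) := by unfold Spec_climb; infer_instance

-- ===== CLAIM (what is proved, stated in full; the proofs are below) =====
def Claim_equal_climb : Prop := ∀ (stamina : Int) (obstacles : List Int), Dom_climb stamina obstacles → Spec_climb stamina obstacles (climb stamina obstacles)

-- ===== LEMMAS AND PROOFS =====

-- prefix sums starting from running total t, structurally
def prefixList (t : Int) : List Int → List Int
  | [] => []
  | c :: cs => (t + c) :: prefixList (t + c) cs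

theorem foldl_prefix (cs : List Int) : ∀ (t : Int) (acc : List Int),
    (cs.foldl (fun (p : Int × List Int) c => (p.1 + c, p.2 ++ [p.1 + c])) (t, acc)).2
      = acc ++ prefixList t cs := by
  induction cs with
  | nil => intro t acc; simp [prefixList]
  | cons c cs ih => intro t acc; simp [List.foldl, prefixList, ih, List.append_assoc]

theorem altScan_shift (xs : List Int) : ∀ (stamina t i : Int),
    altScan stamina i (prefixList t xs) = altScan (stamina - t) i (prefixList 0 xs) := by
  induction xs with
  | nil => intro stamina t i; simp [prefixList, altScan]
  | cons c cs ih =>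
    intro stamina t i
    simp only [prefixList, altScan, zero_add]
    by_cases h : t + c > stamina
    · rw [if_pos h, if_pos (by omega)]
    · rw [if_neg h, if_neg (by omega), ih stamina (t + c) (i + 1), ih (stamina - t) c (i + 1)]
      congr 1; omega

theorem altScan_index (stamina : Int) (xs : List Int) : ∀ (i : Int),
    altScan stamina i xs = (altScan stamina 0 xs).map (fun j => i + j) := by
  induction xs with
  | nil => intro i; simp [altScan]
  | cons p ps ih =>
    intro i
    simp only [altScan]
    by_cases h : p > stamina
    · simp [h]
    · simp only [if_neg h, ih (i + 1), ih (0 + 1)]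
      cases altScan stamina 0 ps with
      | none => simp
      | some j => simp; omega

-- the B-side value computed from a list of costs
def bVal (stamina : Int) (cs : List Int) : Int :=
  match altScan stamina 0 (prefixList 0 cs) with
  | some i => i
  | none => (cs.length : Int)

theorem bVal_cons (st c : Int) (cs : List Int) :
    bVal st (c :: cs) = if st - c < 0 then 0 else 1 + bVal (st - c) cs := by
  by_cases h : st - c < 0
  · rw [if_pos h]
    simp only [bVal, prefixList, altScan, zero_add]
    rw [if_pos (by omega)]
  · rw [if_neg h]
    simp only [bVal, prefixList, altScan, zero_add]
    rw [if_neg (by omega), altScan_shift cs st c 1, altScan_index (st - c) (prefixList 0 cs) 1]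
    cases altScan (st - c) 0 (prefixList 0 cs) with
    | none => simp [Option.map]; omega
    | some j => simp

theorem climbLoop_eq (ps : List (Int × Int)) : ∀ (st cnt : Int),
    climbLoop st cnt ps
      = cnt + bVal st (ps.map (fun xy => (if xy.1 > xy.2 then (1 : Int) else 2) * |xy.1 - xy.2|)) := by
  induction ps with
  | nil => intro st cnt; simp [climbLoop, bVal, prefixList, altScan]
  | cons xy rest ih =>
    intro st cnt
    obtain ⟨x, y⟩ := xy
    have hdiv : PySem.Int.floordiv |x - y| 1 = |x - y| := by simp [PySem.Int.floordiv]
    have hmod : PySem.Int.mod |x - y| 1 = 0 := by simp [PySem.Int.mod]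
    have hf : (if x - y > 0 then (1:Int) else 2) = (if x > y then 1 else 2) :=
      if_congr (by constructor <;> (intro h; omega)) rfl rfl
    show (if st - (if x - y > 0 then (1:Int) else 2) *
        (if PySem.Int.mod |x - y| 1 > 0 then PySem.Int.floordiv |x - y| 1 + 1
         else PySem.Int.floordiv |x - y| 1) < 0 then cnt + 1 - 1
      else climbLoop (st - (if x - y > 0 then (1:Int) else 2) *
        (if PySem.Int.mod |x - y| 1 > 0 then PySem.Int.floordiv |x - y| 1 + 1
         else PySem.Int.floordiv |x - y| 1)) (cnt + 1) rest) = _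
    rw [hdiv, hmod, hf]
    have hmlt : ¬ ((0:Int) < 0) := by omega
    rw [if_neg hmlt]
    simp only [List.map_cons, bVal_cons]
    by_cases h : st - (if x > y then (1 : Int) else 2) * |x - y| < 0
    · rw [if_pos h, if_pos h]; omega
    · rw [if_neg h, if_neg h, ih (st - (if x > y then (1 : Int) else 2) * |x - y|) (cnt + 1)]
      omega

-- ===== VERDICT (by name: the statement is the Claim_ definition above) =====
theorem climb_spec : Claim_equal_climb := by
  intro stamina obstacles _
  show climb stamina obstacles = climb_alt stamina obstacles
  simp only [climb, climb_alt]
  rw [foldl_prefix, List.nil_append, climbLoop_eq]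
  simp [bVal]
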